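-- pv_equiv track=rewrite | github.com/hschickdevs/100-Days-of-Code-Python | gen.py | gen_filenames
-- ===== SOURCE A (Python) =====
-- def gen_filenames(params):
--     filenames = []
--     folders = []
--     folder = ''
--     extension = ''
--     for index, param in enumerate(params):
--         if index % 3 == 0:
--             folder = param
--             folders.append(folder)
--         elif index % 3 == 1:
--             extension = param
--         else:
--             quantity = int(param)
--             if quantity == 0:
--                 files = [f'{folder}/{extension}.py']
--             else:
--                 files = [f'{folder}/{extension}{x:02d}.py' for x in range(1, quantity + 1)]
--             filenames.extend(files)
--     return folders, filenames
-- ===== SOURCE B (Python) =====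
-- def gen_filenames(params):
--     folders = []
--     filenames = []
--     for i in range(0, len(params), 3):
--         group = params[i:i+3]
--         folders.append(group[0])
--         if len(group) == 3:
--             folder, extension, quantity = group[0], group[1], int(group[2])
--             if quantity == 0:
--                 filenames.append(f'{folder}/{extension}.py')
--             else:
--                 filenames.extend(f'{folder}/{extension}{x:02d}.py'
--                                  for x in range(1, quantity + 1))
--     return folders, filenames
-- ===== Notes on version B (the rewrite author's own statement) =====
-- stated objective: simpler
-- what changed: B slices params into consecutive groups of 3 and emits folder/filenames per group, removing the enumerate+index%3 branching and the carried folder/extension state variables.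
import Mathlib
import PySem

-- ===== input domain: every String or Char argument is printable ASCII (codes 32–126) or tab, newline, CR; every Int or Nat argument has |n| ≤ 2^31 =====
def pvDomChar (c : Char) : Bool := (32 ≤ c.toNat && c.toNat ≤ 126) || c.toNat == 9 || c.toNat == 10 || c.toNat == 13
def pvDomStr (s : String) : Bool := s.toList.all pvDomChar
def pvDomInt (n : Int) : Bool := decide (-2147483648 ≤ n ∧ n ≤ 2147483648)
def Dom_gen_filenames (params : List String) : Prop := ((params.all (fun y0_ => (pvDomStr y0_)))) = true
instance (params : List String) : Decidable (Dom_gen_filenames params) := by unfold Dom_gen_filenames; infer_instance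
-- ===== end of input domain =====

-- B replaces A's enumerate+index%3 loop with carried folder/extension state by iterating over
-- consecutive groups of 3 params; same outputs, different decomposition (objective: simpler).


-- ===== PORT A =====
-- f'{x:02d}' for x ≥ 0 (exact: x here comes from range(1, q+1), so x ≥ 1)
def pvFmt2 (x : Int) : String := PySem.Str.zfill (PySem.Int.toStr x) 2

-- one step of A's loop; state = (folders, filenames, folder, extension).
-- int(param) is ported as (ofStr? param).getD 0; Pre_ guarantees ofStr? is some (Python raises otherwise).
def pvAStep (st : List String × List String × String × String) (ip : Int × String) :
    List String × List String × String × String :=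
  if ip.1 % 3 = 0 then (st.1 ++ [ip.2], st.2.1, ip.2, st.2.2.2)
  else if ip.1 % 3 = 1 then (st.1, st.2.1, st.2.2.1, ip.2)
  else
    let quantity := (PySem.Int.ofStr? ip.2).getD 0
    let files :=
      if quantity = 0 then [st.2.2.1 ++ "/" ++ st.2.2.2 ++ ".py"]
      else (PySem.List.pyRange 1 (quantity + 1) 1).map
        (fun x => st.2.2.1 ++ "/" ++ st.2.2.2 ++ pvFmt2 x ++ ".py")
    (st.1, st.2.1 ++ files, st.2.2.1, st.2.2.2)

def gen_filenames (params : List String) : List String × List String :=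
  let st := (PySem.List.enumerate params 0).foldl pvAStep ([], [], "", "")
  (st.1, st.2.1)

-- ===== PORT B =====
-- the filenames contributed by one full group [folder, extension, quantity-string]
def pvBFiles (folder extension qstr : String) : List String :=
  let quantity := (PySem.Int.ofStr? qstr).getD 0
  if quantity = 0 then [folder ++ "/" ++ extension ++ ".py"]
  else (PySem.List.pyRange 1 (quantity + 1) 1).map
    (fun x => folder ++ "/" ++ extension ++ pvFmt2 x ++ ".py")

-- Source B's loop over groups of 3, with the two accumulator lists
def pvBGo (params folders filenames : List String) : List String × List String :=
  match params with
  | [] => (folders, filenames)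
  | [a] => (folders ++ [a], filenames)
  | [a, _] => (folders ++ [a], filenames)
  | a :: b :: c :: rest => pvBGo rest (folders ++ [a]) (filenames ++ pvBFiles a b c)

def gen_filenames_alt (params : List String) : List String × List String :=
  pvBGo params [] []

-- ===== PRECONDITION & SPEC =====
-- Pre_ excludes exactly the inputs where int(params[i]) raises ValueError (every third element,
-- index ≡ 2 mod 3, must be an int-literal string); the Python A (and B) raise there.
def Pre_gen_filenames (params : List String) : Prop :=
  ∀ i : Nat, i < params.length → i % 3 = 2 → (PySem.Int.ofStr? (params.getD i "")).isSome = true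
instance (params : List String) : Decidable (Pre_gen_filenames params) := by
  unfold Pre_gen_filenames; infer_instance
def pvWitness_gen_filenames : List String := ["day1", "exercise", "2", "day2"]

def Spec_gen_filenames (params : List String) (out : List String × List String) : Prop := out = gen_filenames_alt params
instance (params : List String) (out : List String × List String) : Decidable (Spec_gen_filenames params out) := by unfold Spec_gen_filenames; infer_instance

-- ===== CLAIM (what is proved, stated in full; the proofs are below) =====
def Claim_equal_gen_filenames : Prop := ∀ (params : List String), Dom_gen_filenames params → Pre_gen_filenames params → Spec_gen_filenames params (gen_filenames params)

-- ===== LEMMAS AND PROOFS =====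
lemma pv_key : ∀ (params folders filenames : List String), ∀ (s : Int) (folder ext : String),
    s % 3 = 0 →
    (let st := (PySem.List.enumerate params s).foldl pvAStep (folders, filenames, folder, ext)
     (st.1, st.2.1)) = pvBGo params folders filenames := by
  intro params folders filenames
  induction params, folders, filenames using pvBGo.induct with
  | case1 folders filenames =>
    intro s folder ext hs
    simp [PySem.List.enumerate_nil, pvBGo]
  | case2 folders filenames a =>
    intro s folder ext hs
    simp [PySem.List.enumerate_cons, PySem.List.enumerate_nil, pvAStep, hs, pvBGo]
  | case3 folders filenames a b =>
    intro s folder ext hs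
    have h1 : (s + 1) % 3 = 1 := by omega
    simp [PySem.List.enumerate_cons, PySem.List.enumerate_nil, pvAStep, hs, h1, pvBGo]
  | case4 folders filenames a b c rest ih =>
    intro s folder ext hs
    have h1 : (s + 1) % 3 ≠ 0 := by omega
    have h1' : (s + 1) % 3 = 1 := by omega
    have h2 : (s + 1 + 1) % 3 ≠ 0 := by omega
    have h2' : (s + 1 + 1) % 3 ≠ 1 := by omega
    have h3 : (s + 1 + 1 + 1) % 3 = 0 := by omega
    simp only [PySem.List.enumerate_cons, List.foldl_cons]
    rw [show pvAStep (folders, filenames, folder, ext) (s, a)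
          = (folders ++ [a], filenames, a, ext) by simp [pvAStep, hs]]
    rw [show pvAStep (folders ++ [a], filenames, a, ext) (s + 1, b)
          = (folders ++ [a], filenames, a, b) by simp [pvAStep, h1']]
    rw [show pvAStep (folders ++ [a], filenames, a, b) (s + 1 + 1, c)
          = (folders ++ [a], filenames ++ pvBFiles a b c, a, b) by
        simp [pvAStep, h2, h2', pvBFiles]]
    rw [pvBGo]
    exact ih (s + 1 + 1 + 1) a b h3

-- ===== VERDICT (by name: the statement is the Claim_ definition above) =====
theorem gen_filenames_spec : Claim_equal_gen_filenames := by
  intro params _ _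
  unfold Spec_gen_filenames gen_filenames gen_filenames_alt
  exact pv_key params [] [] 0 "" "" (by decide)
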